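-- pv_equiv track=rewrite | github.com/AthharPro/zypher | python-scanner/zypher_scanner/db_ruls/cicd-vuln-007.py | _find_script_line
-- ===== SOURCE A (Python) =====
-- from typing import List, Dict, Any
--
-- def _find_script_line(file_lines: List[str], job_name: str, script_content: str) -> int:
--     job_line = -1
--     script_line = -1
--     for i, line in enumerate(file_lines):
--         if line.strip().startswith(f"{job_name}:"):
--             job_line = i
--             break
--     if job_line < 0:
--         return -1
--     for i in range(job_line, len(file_lines)):
--         if "script:" in file_lines[i]:
--             script_line = i
--             break
--     if script_line < 0:
--         return -1
--     for i in range(script_line + 1, len(file_lines)):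
--         if script_content in file_lines[i]:
--             return i
--         if file_lines[i].strip() and not file_lines[i].strip().startswith("-") and not file_lines[i].strip().startswith(" "):
--             break
--     return -1
-- ===== SOURCE B (Python) =====
-- def _find_script_line(file_lines, job_name, script_content):
--     # single pass: 0 = seeking job, 1 = seeking "script:", 2 = scanning script body
--     state = 0
--     for i, line in enumerate(file_lines):
--         if state == 0 and line.strip().startswith(job_name + ":"):
--             state = 1  # fall through: the job line itself may hold "script:"
--         if state == 1:
--             if "script:" in line:
--                 state = 2
--         elif state == 2:
--             if script_content in line:
--                 return i
--             s = line.strip()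
--             if s and not s.startswith("-") and not s.startswith(" "):
--                 return -1
--     return -1
-- ===== Notes on version B (the rewrite author's own statement) =====
-- stated objective: alternative
-- what changed: Replaced A's three sequential index-based scans (find job line, re-scan from it for 'script:', re-scan for content) with one fused single-pass state machine over enumerate(file_lines) whose state records which phase the scan is in, falling through on the job line so it can also be the script line.
import Mathlib
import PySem

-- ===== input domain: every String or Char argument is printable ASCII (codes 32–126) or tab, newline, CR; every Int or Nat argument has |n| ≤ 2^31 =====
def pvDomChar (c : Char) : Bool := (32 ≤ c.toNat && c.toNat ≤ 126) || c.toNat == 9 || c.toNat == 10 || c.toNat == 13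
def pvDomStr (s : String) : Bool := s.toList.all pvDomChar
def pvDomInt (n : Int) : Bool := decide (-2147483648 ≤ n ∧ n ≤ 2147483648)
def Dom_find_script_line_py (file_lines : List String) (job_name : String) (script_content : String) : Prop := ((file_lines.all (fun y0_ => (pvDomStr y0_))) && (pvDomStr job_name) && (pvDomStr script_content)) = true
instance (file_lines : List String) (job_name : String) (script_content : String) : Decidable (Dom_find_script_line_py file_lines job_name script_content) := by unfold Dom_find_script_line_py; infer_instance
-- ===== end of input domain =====

-- ===== PORT A =====
-- B is a single fused state-machine pass; A's return value is unchanged (return-value equivalence; no mutation).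
-- first loop: enumerate, break at the first line whose strip() starts with "<job_name>:"
def aLoop1 (job_name : String) : List String → Nat → Option Nat
  | [], _ => none
  | line :: rest, i =>
    if PySem.Str.startswith (PySem.Str.strip line) (job_name ++ ":") then some i
    else aLoop1 job_name rest (i + 1)

-- second loop: for i in range(job_line, len(file_lines)), break at the first line containing "script:"
def aLoop2 (file_lines : List String) (i : Nat) : Option Nat :=
  if h : i < file_lines.length then
    if PySem.Str.isIn "script:" file_lines[i] then some i else aLoop2 file_lines (i + 1)
  else none
termination_by file_lines.length - i

-- third loop: for i in range(script_line + 1, len(file_lines))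
def aLoop3 (file_lines : List String) (script_content : String) (i : Nat) : Int :=
  if h : i < file_lines.length then
    if PySem.Str.isIn script_content file_lines[i] then (i : Int)
    else if (PySem.Str.strip file_lines[i] != "")
         && !(PySem.Str.startswith (PySem.Str.strip file_lines[i]) "-")
         && !(PySem.Str.startswith (PySem.Str.strip file_lines[i]) " ") then -1
    else aLoop3 file_lines script_content (i + 1)
  else -1
termination_by file_lines.length - i

def find_script_line_py (file_lines : List String) (job_name : String) (script_content : String) : Int :=
  match aLoop1 job_name file_lines 0 with
  | none => -1
  | some job_line =>
    match aLoop2 file_lines job_line with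
    | none => -1
    | some script_line => aLoop3 file_lines script_content (script_line + 1)

-- ===== PORT B =====
-- one pass with a state: 0 = seeking job, 1 = seeking "script:", 2 = scanning script body
def bLoop (job_name script_content : String) : List String → Nat → Nat → Int
  | [], _, _ => -1
  | line :: rest, i, state =>
    let state1 := if state == 0 && PySem.Str.startswith (PySem.Str.strip line) (job_name ++ ":")
                  then 1 else state  -- fall through: the job line itself may hold "script:"
    if state1 == 1 then
      if PySem.Str.isIn "script:" line then bLoop job_name script_content rest (i + 1) 2
      else bLoop job_name script_content rest (i + 1) state1
    else if state1 == 2 then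
      if PySem.Str.isIn script_content line then (i : Int)
      else
        let s := PySem.Str.strip line
        if (s != "") && !(PySem.Str.startswith s "-") && !(PySem.Str.startswith s " ") then -1
        else bLoop job_name script_content rest (i + 1) state1
    else bLoop job_name script_content rest (i + 1) state1

def find_script_line_py_alt (file_lines : List String) (job_name : String) (script_content : String) : Int :=
  bLoop job_name script_content file_lines 0 0

-- ===== PRECONDITION & SPEC =====
def Spec_find_script_line_py (file_lines : List String) (job_name : String) (script_content : String) (out : Int) : Prop := out = find_script_line_py_alt file_lines job_name script_content
instance (file_lines : List String) (job_name : String) (script_content : String) (out : Int) : Decidable (Spec_find_script_line_py file_lines job_name script_content out) := by unfold Spec_find_script_line_py; infer_instance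

-- ===== CLAIM (what is proved, stated in full; the proofs are below) =====
def Claim_equal_find_script_line_py : Prop := ∀ (file_lines : List String) (job_name : String) (script_content : String), Dom_find_script_line_py file_lines job_name script_content → Spec_find_script_line_py file_lines job_name script_content (find_script_line_py file_lines job_name script_content)

-- ===== LEMMAS AND PROOFS =====

theorem bLoop_state2 (jn sc : String) (fl : List String) :
    ∀ i, bLoop jn sc (fl.drop i) i 2 = aLoop3 fl sc i := by
  have key : ∀ n i, fl.length - i = n → bLoop jn sc (fl.drop i) i 2 = aLoop3 fl sc i := by
    intro n
    induction n with
    | zero =>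
      intro i h
      have hle : fl.length ≤ i := by omega
      rw [List.drop_eq_nil_of_le hle, aLoop3]
      simp [bLoop, Nat.not_lt.mpr hle]
    | succ n ih =>
      intro i h
      have hi : i < fl.length := by omega
      rw [List.drop_eq_getElem_cons hi, aLoop3]
      simp only [bLoop, show ((2:Nat) == 0) = false from rfl, show ((2:Nat) == 1) = false from rfl,
        show ((2:Nat) == 2) = true from rfl, Bool.false_and, Bool.false_eq_true, if_false,
        if_true, dif_pos hi]
      split
      · rfl
      · split
        · rfl
        · exact ih (i + 1) (by omega)
  exact fun i => key (fl.length - i) i rfl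

theorem bLoop_state1 (jn sc : String) (fl : List String) :
    ∀ i, bLoop jn sc (fl.drop i) i 1 =
      (match aLoop2 fl i with
       | none => -1
       | some s => aLoop3 fl sc (s + 1)) := by
  have key : ∀ n i, fl.length - i = n → bLoop jn sc (fl.drop i) i 1 =
      (match aLoop2 fl i with
       | none => -1
       | some s => aLoop3 fl sc (s + 1)) := by
    intro n
    induction n with
    | zero =>
      intro i h
      have hle : fl.length ≤ i := by omega
      rw [List.drop_eq_nil_of_le hle, aLoop2]
      simp [bLoop, Nat.not_lt.mpr hle]
    | succ n ih =>
      intro i h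
      have hi : i < fl.length := by omega
      rw [List.drop_eq_getElem_cons hi, aLoop2]
      simp only [bLoop, show ((1:Nat) == 0) = false from rfl, show ((1:Nat) == 1) = true from rfl,
        Bool.false_and, Bool.false_eq_true, if_false, if_true, dif_pos hi]
      by_cases h1 : PySem.Str.isIn "script:" fl[i] = true
      · rw [if_pos h1, if_pos h1]
        exact bLoop_state2 jn sc fl (i + 1)
      · rw [if_neg h1, if_neg h1]
        exact ih (i + 1) (by omega)
  exact fun i => key (fl.length - i) i rfl

theorem bLoop_state0 (jn sc : String) (fl : List String) :
    ∀ i, bLoop jn sc (fl.drop i) i 0 =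
      (match aLoop1 jn (fl.drop i) i with
       | none => -1
       | some j =>
         match aLoop2 fl j with
         | none => -1
         | some s => aLoop3 fl sc (s + 1)) := by
  have key : ∀ n i, fl.length - i = n → bLoop jn sc (fl.drop i) i 0 =
      (match aLoop1 jn (fl.drop i) i with
       | none => -1
       | some j =>
         match aLoop2 fl j with
         | none => -1
         | some s => aLoop3 fl sc (s + 1)) := by
    intro n
    induction n with
    | zero =>
      intro i h
      have hle : fl.length ≤ i := by omega
      rw [List.drop_eq_nil_of_le hle]
      simp [bLoop, aLoop1]
    | succ n ih =>
      intro i h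
      have hi : i < fl.length := by omega
      rw [List.drop_eq_getElem_cons hi]
      simp only [bLoop, aLoop1, show ((0:Nat) == 0) = true from rfl, Bool.true_and]
      by_cases h0 : PySem.Str.startswith (PySem.Str.strip fl[i]) (jn ++ ":") = true
      · -- job found at line i: B falls through to the "script:" check on the same line
        have ha2 : aLoop2 fl i
            = if PySem.Str.isIn "script:" fl[i] = true then some i else aLoop2 fl (i + 1) := by
          rw [aLoop2]; simp [hi]
        rw [if_pos h0, if_pos h0]
        simp only [show ((1:Nat) == 1) = true from rfl, if_true, ha2]
        by_cases h1 : PySem.Str.isIn "script:" fl[i] = true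
        · rw [if_pos h1, if_pos h1]
          exact bLoop_state2 jn sc fl (i + 1)
        · rw [if_neg h1, if_neg h1]
          exact bLoop_state1 jn sc fl (i + 1)
      · rw [if_neg h0, if_neg h0]
        simp only [show ((0:Nat) == 1) = false from rfl, show ((0:Nat) == 2) = false from rfl,
          Bool.false_eq_true, if_false]
        exact ih (i + 1) (by omega)
  exact fun i => key (fl.length - i) i rfl

-- ===== VERDICT (by name: the statement is the Claim_ definition above) =====
theorem find_script_line_py_spec : Claim_equal_find_script_line_py := by
  intro fl jn sc _
  unfold Spec_find_script_line_py find_script_line_py find_script_line_py_alt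
  have h := bLoop_state0 jn sc fl 0
  simpa using h.symm
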